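-- pv_equiv track=rewrite | github.com/The-Full-Stack-Code-Meetups/coding-problems | python/problem-09/script.py | palindrome_split
-- ===== SOURCE A (Python) =====
-- def palindrome_split(text):
--
--     text_as_list = [x for x in text]
--     if len(text) <= 3:
--         return text_as_list
--     check_word = ''
--     palindromes = []
--     for each_letter in range(len(text_as_list)):
--         check_word += (text_as_list[each_letter])
--         if len(check_word) > 2:
--             if check_word == check_word[::-1]:
--                 palindromes.append(check_word)
--                 check_word = ''
--     return palindromes
-- ===== SOURCE B (Python) =====
-- def palindrome_split(text):
--     # Greedy: repeatedly cut off the shortest palindromic prefix of length >= 3.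
--     if len(text) <= 3:
--         return list(text)
--     out = []
--     s = text
--     while True:
--         k = next((j for j in range(3, len(s) + 1) if s[:j] == s[:j][::-1]), None)
--         if k is None:
--             return out
--         out.append(s[:k])
--         s = s[k:]
-- ===== Notes on version B (the rewrite author's own statement) =====
-- stated objective: alternative
-- what changed: A grows a buffer one character at a time and tests it after each append; B instead repeatedly searches for and cuts off the shortest palindromic prefix (length >= 3) of the remaining string using slice comparisons.
import Mathlib
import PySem

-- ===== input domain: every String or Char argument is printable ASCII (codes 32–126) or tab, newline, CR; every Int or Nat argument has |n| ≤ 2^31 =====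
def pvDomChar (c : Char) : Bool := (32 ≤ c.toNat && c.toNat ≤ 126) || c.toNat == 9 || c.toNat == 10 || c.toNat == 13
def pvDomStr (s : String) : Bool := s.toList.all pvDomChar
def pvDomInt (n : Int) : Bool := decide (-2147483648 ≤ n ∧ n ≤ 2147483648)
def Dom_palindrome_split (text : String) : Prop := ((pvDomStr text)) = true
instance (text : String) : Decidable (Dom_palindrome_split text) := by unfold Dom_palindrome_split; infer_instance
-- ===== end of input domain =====

-- B differs from A: instead of growing a buffer letter by letter, B repeatedly cuts off the
-- shortest palindromic prefix (length ≥ 3) of the remaining text (objective: alternative).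

-- ===== PORT A =====
-- one loop step: check_word += text_as_list[each_letter]; if len > 2 and palindrome, emit and reset
def pvStepA (st : List Char × List String) (c : Char) : List Char × List String :=
  let check := st.1 ++ [c]
  if 2 < check.length ∧ check = check.reverse then   -- check_word == check_word[::-1] ([::-1] reverses)
    ([], st.2 ++ [String.ofList check])
  else (check, st.2)

def palindrome_split (text : String) : List String :=
  let text_as_list := text.toList
  if text_as_list.length ≤ 3 then text_as_list.map (fun c => String.ofList [c])
  else
    ((PySem.List.pyRange 0 (PySem.List.len text_as_list) 1).foldl
      (fun st j => pvStepA st (PySem.List.pyGetD text_as_list j ' ')) ([], [])).2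

-- ===== PORT B =====
-- next((j for j in range(3, len(s) + 1) if s[:j] == s[:j][::-1]), None)
def pvFirstPal (s : List Char) : Option Nat :=
  (List.range' 3 (s.length + 1 - 3)).find? (fun j => s.take j == (s.take j).reverse)

lemma pvFirstPal_bounds {s : List Char} {k : Nat} (h : pvFirstPal s = some k) :
    3 ≤ k ∧ k ≤ s.length := by
  have hm := List.mem_of_find?_eq_some h
  have := List.mem_range'_1.mp hm
  omega

-- while True: cut off the shortest palindromic prefix; stop when none exists
def pvGoB (s : List Char) : List String :=
  match h : pvFirstPal s with
  | none => []
  | some k => String.ofList (s.take k) :: pvGoB (s.drop k)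
termination_by s.length
decreasing_by
  have := pvFirstPal_bounds h
  simp only [List.length_drop]; omega

def palindrome_split_alt (text : String) : List String :=
  let tl := text.toList
  if tl.length ≤ 3 then tl.map (fun c => String.ofList [c])
  else pvGoB tl

-- ===== PRECONDITION & SPEC =====
def Spec_palindrome_split (text : String) (out : List String) : Prop := out = palindrome_split_alt text
instance (text : String) (out : List String) : Decidable (Spec_palindrome_split text out) := by unfold Spec_palindrome_split; infer_instance

-- ===== CLAIM (what is proved, stated in full; the proofs are below) =====
def Claim_equal_palindrome_split : Prop := ∀ (text : String), Dom_palindrome_split text → Spec_palindrome_split text (palindrome_split text)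

-- ===== LEMMAS AND PROOFS =====

-- A's loop as a pure producer of the emitted palindromes
def pvF (check : List Char) : List Char → List String
  | [] => []
  | c :: rest =>
      if 2 < (check ++ [c]).length ∧ (check ++ [c]) = (check ++ [c]).reverse then
        String.ofList (check ++ [c]) :: pvF [] rest
      else pvF (check ++ [c]) rest

lemma pvFoldA_eq_pvF (l : List Char) : ∀ (check : List Char) (pals : List String),
    (l.foldl pvStepA (check, pals)).2 = pals ++ pvF check l := by
  induction l with
  | nil => intro check pals; simp [pvF]
  | cons c rest ih =>
      intro check pals
      simp only [List.foldl_cons, pvStepA, pvF]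
      split_ifs with h
      · rw [ih]; simp
      · rw [ih]

-- the extension predicate A effectively tests j letters after a restart point
def pvP (check l : List Char) (j : Nat) : Bool :=
  (2 < (check ++ l.take j).length) && (check ++ l.take j == (check ++ l.take j).reverse)

lemma pvFind?_congr {p q : Nat → Bool} : ∀ {l : List Nat}, (∀ a ∈ l, p a = q a) →
    l.find? p = l.find? q := by
  intro l
  induction l with
  | nil => intro _; rfl
  | cons a t ih =>
    intro h
    simp only [List.find?_cons, h a (by simp)]
    cases hq : q a <;> simp [ih (fun b hb => h b (by simp [hb]))]

-- pvF emits the first extension satisfying pvP, then restarts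
lemma pvF_eq_find (l : List Char) : ∀ (check : List Char),
    pvF check l =
      match (List.range' 1 l.length).find? (pvP check l) with
      | none => []
      | some j => String.ofList (check ++ l.take j) :: pvF [] (l.drop j) := by
  induction l with
  | nil => intro check; simp [pvF]
  | cons c rest ih =>
      intro check
      have hrange : List.range' 1 (c :: rest).length = 1 :: List.range' 2 rest.length := by
        simp [List.range'_succ]
      have hunfold : pvF check (c :: rest) =
          if 2 < (check ++ [c]).length ∧ (check ++ [c]) = (check ++ [c]).reverse then
            String.ofList (check ++ [c]) :: pvF [] rest
          else pvF (check ++ [c]) rest := rfl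
      rw [hrange]
      by_cases h1 : pvP check (c :: rest) 1
      · have hc : 2 < (check ++ [c]).length ∧ (check ++ [c]) = (check ++ [c]).reverse := by
          have := h1; simp [pvP] at this; simpa using this
        rw [List.find?_cons_of_pos h1, hunfold, if_pos hc]
        simp
      · have hc : ¬ (2 < (check ++ [c]).length ∧ (check ++ [c]) = (check ++ [c]).reverse) := by
          intro hx; apply h1; simp [pvP]; simpa using hx
        have hmap : List.range' 2 rest.length = (List.range' 1 rest.length).map (· + 1) := by
          rw [List.range'_eq_map_range, List.range'_eq_map_range, List.map_map]
          exact List.map_congr_left (fun a _ => by simp [Function.comp]; omega)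
        have hpred : ∀ j, pvP check (c :: rest) (j + 1) = pvP (check ++ [c]) rest j := by
          intro j
          simp [pvP, List.take_succ_cons]
        rw [List.find?_cons_of_neg h1, hunfold, if_neg hc, ih (check ++ [c]), hmap,
            List.find?_map]
        have hcomp : (List.range' 1 rest.length).find? (pvP check (c :: rest) ∘ fun x => x + 1)
            = (List.range' 1 rest.length).find? (pvP (check ++ [c]) rest) :=
          pvFind?_congr (fun a _ => by simpa using hpred a)
        rw [hcomp]
        cases hfind : (List.range' 1 rest.length).find? (pvP (check ++ [c]) rest) with
        | none => simp
        | some j =>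
            simp only [Option.map_some]
            simp [List.take_succ_cons, List.drop_succ_cons]

-- with an empty buffer the first hit is exactly B's pvFirstPal
lemma pvFind_nil_eq_firstPal (l : List Char) :
    (List.range' 1 l.length).find? (pvP [] l) = pvFirstPal l := by
  by_cases h2 : 2 ≤ l.length
  · have hsplit : List.range' 1 l.length = [1, 2] ++ List.range' 3 (l.length - 2) := by
      have h2' : List.range' 1 (2 + (l.length - 2)) = List.range' 1 2 ++ List.range' 3 (l.length - 2) :=
        (List.range'_append (s := 1) (m := 2) (n := l.length - 2) (step := 1)).symm
      nth_rewrite 1 [show l.length = 2 + (l.length - 2) by omega]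
      rw [h2']; rfl
    have hp1 : pvP [] l 1 = false := by simp [pvP]
    have hp2 : pvP [] l 2 = false := by simp [pvP]
    rw [hsplit, List.find?_append]
    simp only [List.find?_cons, hp1, hp2, List.find?_nil, Option.none_or]
    unfold pvFirstPal
    rw [show l.length + 1 - 3 = l.length - 2 by omega]
    apply pvFind?_congr
    intro j hj
    have hjb := List.mem_range'_1.mp hj
    have hlen : (l.take j).length = j := by
      rw [List.length_take]; omega
    simp [pvP, hlen]
    omega
  · -- too short: both searches are empty / all-false
    have hnone : (List.range' 1 l.length).find? (pvP [] l) = none := by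
      apply List.find?_eq_none.mpr
      intro j hj
      have hjb := List.mem_range'_1.mp hj
      simp [pvP, List.length_take]
      omega
    rw [hnone]
    unfold pvFirstPal
    rw [show l.length + 1 - 3 = 0 by omega]
    rfl

lemma pvF_nil_eq_goB : ∀ (n : Nat) (l : List Char), l.length ≤ n → pvF [] l = pvGoB l := by
  intro n
  induction n with
  | zero =>
      intro l hl
      have : l = [] := List.eq_nil_of_length_eq_zero (by omega)
      subst this
      rw [pvGoB]
      rfl
  | succ m ih =>
      intro l hl
      rw [pvF_eq_find, pvFind_nil_eq_firstPal, pvGoB]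
      cases hfp : pvFirstPal l with
      | none => rfl
      | some k =>
          have hb := pvFirstPal_bounds hfp
          simp only [List.nil_append]
          rw [ih (l.drop k) (by simp [List.length_drop]; omega)]

-- ===== VERDICT (by name: the statement is the Claim_ definition above) =====
theorem palindrome_split_spec : Claim_equal_palindrome_split := by
  intro text _
  show _ = _
  simp only [palindrome_split, palindrome_split_alt]
  by_cases h : text.toList.length ≤ 3
  · rw [if_pos h, if_pos h]
  · rw [if_neg h, if_neg h,
        PySem.List.foldl_pyRange_zero_pyGetD text.toList ' ' pvStepA ([], []),
        pvFoldA_eq_pvF, List.nil_append, pvF_nil_eq_goB text.toList.length _ le_rfl]
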